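-- pv_equiv track=rewrite | github.com/jmkinser/ModSim411 | chess.py | PickMove
-- ===== SOURCE A (Python) =====
-- import copy
--
-- def PickMove(moves):
--     best = []; bestsc = 0
--     for m in moves:
--         if m[3]>bestsc:
--             bestsc = m[3]
--             best = copy.deepcopy(m)
--     # second best move 0 just for grins
--     best2, best2sc = [],0
--     for m in moves:
--         if m[3]>best2sc and m[3]<bestsc:
--             best2sc = m[3]
--             best2 = copy.deepcopy(m)
--     return best, best2
-- ===== SOURCE B (Python) =====
-- import copy
--
-- def PickMove(moves):
--     # single pass maintaining best and second-best (strictly lower, positive) scores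
--     best, bestsc = [], 0
--     best2, best2sc = [], 0
--     for m in moves:
--         s = m[3]
--         if s > bestsc:
--             best2, best2sc = best, bestsc
--             best, bestsc = copy.deepcopy(m), s
--         elif s < bestsc and s > best2sc:
--             best2, best2sc = copy.deepcopy(m), s
--     return best, best2
-- ===== Notes on version B (the rewrite author's own statement) =====
-- stated objective: alternative
-- what changed: Replaces A's two full scans (one for the best score, a second for the best strictly-lower positive score) with a single top-two-tracking pass that demotes the current best when a higher score arrives.
import Mathlib
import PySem

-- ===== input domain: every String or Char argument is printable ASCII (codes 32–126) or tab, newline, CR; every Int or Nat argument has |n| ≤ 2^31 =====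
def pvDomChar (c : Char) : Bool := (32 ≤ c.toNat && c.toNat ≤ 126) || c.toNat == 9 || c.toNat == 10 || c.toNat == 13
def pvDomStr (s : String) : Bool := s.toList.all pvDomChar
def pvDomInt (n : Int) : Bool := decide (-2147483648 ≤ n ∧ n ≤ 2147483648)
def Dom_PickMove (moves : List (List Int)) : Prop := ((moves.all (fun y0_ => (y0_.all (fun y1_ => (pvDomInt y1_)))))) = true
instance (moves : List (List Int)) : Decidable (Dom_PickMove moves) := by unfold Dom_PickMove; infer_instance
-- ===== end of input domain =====

-- B replaces A's two full scans with one top-two-tracking pass (same O(n) cost, one traversal).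

-- m[3]; exact under Pre_PickMove (every move has length ≥ 4, so pyGet? is some)
def pvSc (m : List Int) : Int := (PySem.List.pyGet? m 3).getD 0

-- ===== PORT A =====
-- first loop: best / bestsc
def pvStep1 (st : List Int × Int) (m : List Int) : List Int × Int :=
  if pvSc m > st.2 then (m, pvSc m) else st

-- second loop: best2 / best2sc, threshold = final bestsc
def pvStep2 (bestsc : Int) (st : List Int × Int) (m : List Int) : List Int × Int :=
  if pvSc m > st.2 ∧ pvSc m < bestsc then (m, pvSc m) else st

def PickMove (moves : List (List Int)) : List Int × List Int :=
  let b := moves.foldl pvStep1 ([], 0)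
  let b2 := moves.foldl (pvStep2 b.2) ([], 0)
  (b.1, b2.1)

-- ===== PORT B =====
-- one pass: state = ((best, bestsc), (best2, best2sc))
def pvStepB (st : (List Int × Int) × (List Int × Int)) (m : List Int) :
    (List Int × Int) × (List Int × Int) :=
  let s := pvSc m
  if s > st.1.2 then ((m, s), st.1)
  else if s < st.1.2 ∧ s > st.2.2 then (st.1, (m, s))
  else st

def PickMove_alt (moves : List (List Int)) : List Int × List Int :=
  let st := moves.foldl pvStepB (([], 0), ([], 0))
  (st.1.1, st.2.1)

-- ===== PRECONDITION & SPEC =====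
-- A evaluates m[3] on every move, so it raises IndexError iff some move has fewer than 4 entries.
def Pre_PickMove (moves : List (List Int)) : Prop := ∀ m ∈ moves, 4 ≤ m.length
instance (moves : List (List Int)) : Decidable (Pre_PickMove moves) := by unfold Pre_PickMove; infer_instance

def pvWitness_PickMove : List (List Int) := [[0, 0, 0, 3], [1, 1, 1, 5], [2, 2, 2, 4]]

def Spec_PickMove (moves : List (List Int)) (out : List Int × List Int) : Prop := out = PickMove_alt moves
instance (moves : List (List Int)) (out : List Int × List Int) : Decidable (Spec_PickMove moves out) := by unfold Spec_PickMove; infer_instance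

-- ===== CLAIM (what is proved, stated in full; the proofs are below) =====
def Claim_equal_PickMove : Prop := ∀ (moves : List (List Int)), Dom_PickMove moves → Pre_PickMove moves → Spec_PickMove moves (PickMove moves)

-- ===== LEMMAS AND PROOFS =====

-- scan1's score component never decreases
theorem pvStep1_mono (p : List (List Int)) (st : List Int × Int) :
    st.2 ≤ (p.foldl pvStep1 st).2 := by
  induction p generalizing st with
  | nil => simp
  | cons a t ih =>
    simp only [List.foldl_cons]
    refine le_trans ?_ (ih (pvStep1 st a))
    unfold pvStep1; split_ifs with h
    · exact le_of_lt h
    · exact le_refl _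

-- every processed score is ≤ scan1's final score
theorem pvStep1_bound (p : List (List Int)) (st : List Int × Int) (m : List Int)
    (hm : m ∈ p) : pvSc m ≤ (p.foldl pvStep1 st).2 := by
  induction p generalizing st with
  | nil => cases hm
  | cons a t ih =>
    simp only [List.foldl_cons]
    rcases List.mem_cons.mp hm with h | h
    · subst h
      refine le_trans ?_ (pvStep1_mono t (pvStep1 st m))
      unfold pvStep1; split_ifs with h
      · exact le_refl _
      · omega
    · exact ih (pvStep1 st a) h

-- when the threshold exceeds every score, scan2 is scan1
theorem pvStep2_high (B : Int) (p : List (List Int)) (st : List Int × Int)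
    (h : ∀ m ∈ p, pvSc m < B) :
    p.foldl (pvStep2 B) st = p.foldl pvStep1 st := by
  induction p generalizing st with
  | nil => rfl
  | cons a t ih =>
    simp only [List.foldl_cons]
    have ha : pvSc a < B := h a (by simp)
    have hstep : pvStep2 B st a = pvStep1 st a := by
      unfold pvStep2 pvStep1
      by_cases h : pvSc a > st.2
      · rw [if_pos ⟨h, ha⟩, if_pos h]
      · rw [if_neg (fun hh => h hh.1), if_neg h]
    rw [hstep]
    exact ih _ (fun m hm => h m (List.mem_cons_of_mem _ hm))

-- main invariant: B's one-pass state is (scan1 over p, scan2 over p with p's own best score)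
theorem pvInv (p : List (List Int)) :
    p.foldl pvStepB (([], 0), ([], 0)) =
      (p.foldl pvStep1 ([], 0), p.foldl (pvStep2 (p.foldl pvStep1 ([], 0)).2) ([], 0)) := by
  induction p using List.reverseRecOn with
  | nil => rfl
  | append_singleton p m ih =>
    simp only [List.foldl_append, List.foldl_cons, List.foldl_nil, ih]
    set b := p.foldl pvStep1 ([], 0) with hb
    by_cases hgt : pvSc m > b.2
    · -- new strict max: demote the old best
      have hall : ∀ x ∈ p, pvSc x < pvSc m :=
        fun x hx => lt_of_le_of_lt (pvStep1_bound p ([], 0) x hx) hgt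
      have h1 : pvStep1 b m = (m, pvSc m) := by unfold pvStep1; simp [hgt]
      have hB : pvStepB (b, p.foldl (pvStep2 b.2) ([], 0)) m = ((m, pvSc m), b) := by
        unfold pvStepB; simp [hgt]
      have h2 : pvStep2 (pvSc m) (p.foldl (pvStep2 (pvSc m)) ([], 0)) m
          = p.foldl (pvStep2 (pvSc m)) ([], 0) := by
        unfold pvStep2; split_ifs with h <;> first | omega | rfl
      rw [hB, h1, h2, pvStep2_high (pvSc m) p ([], 0) hall]
    · -- best unchanged; the second-best updates identically on both sides
      have h1 : pvStep1 b m = b := by unfold pvStep1; simp [hgt]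
      rw [h1]
      set S2 := p.foldl (pvStep2 b.2) ([], 0) with hS2
      show pvStepB (b, S2) m = (b, pvStep2 b.2 S2 m)
      simp only [pvStepB, pvStep2]
      rw [if_neg hgt]
      by_cases hc : pvSc m < b.2 ∧ pvSc m > S2.2
      · rw [if_pos hc, if_pos ⟨hc.2, hc.1⟩]
      · rw [if_neg hc, if_neg (fun h => hc ⟨h.2, h.1⟩)]

theorem PickMove_eq (moves : List (List Int)) : PickMove moves = PickMove_alt moves := by
  unfold PickMove PickMove_alt
  rw [pvInv]

-- ===== VERDICT (by name: the statement is the Claim_ definition above) =====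
theorem PickMove_spec : Claim_equal_PickMove := by
  intro moves _ _
  unfold Spec_PickMove
  exact PickMove_eq moves
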